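-- pv_equiv track=rewrite | github.com/yandex/yatool | devtools/ya/build/makelist/__init__.py | parse_make_files_dart
-- ===== SOURCE A (Python) =====
-- def parse_make_files_dart(dart_content):
--     def to_stream(data):
--         dart_entry = {}
--         for line in data:
--             if line.startswith('==='):
--                 if dart_entry:
--                     yield dart_entry
--                     dart_entry = {}
--             elif line:
--                 key, value = line.split(': ', 1)
--                 dart_entry[key.strip()] = value.strip()
--         if dart_entry:
--             yield dart_entry
--
--     result = list(to_stream(dart_content))
--     return result
-- ===== SOURCE B (Python) =====
-- def parse_make_files_dart(dart_content):
--     # Phase 1: partition the lines into blocks, a new block at every '===' marker;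
--     # empty lines are dropped but do not end a block.
--     blocks = []
--     current = []
--     for line in dart_content:
--         if line.startswith('==='):
--             blocks.append(current)
--             current = []
--         elif line:
--             current.append(line)
--     blocks.append(current)
--     # Phase 2: each non-empty block becomes one dict.
--     result = []
--     for block in blocks:
--         if block:
--             entry = {}
--             for line in block:
--                 key, value = line.split(': ', 1)
--                 entry[key.strip()] = value.strip()
--             result.append(entry)
--     return result
-- ===== Notes on version B (the rewrite author's own statement) =====
-- stated objective: alternative
-- what changed: B replaces A's single streaming generator (building dicts while scanning and flushing at markers) with two phases: first partition the lines into blocks at '===' markers, then turn each non-empty block into a dict.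
import Mathlib
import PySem

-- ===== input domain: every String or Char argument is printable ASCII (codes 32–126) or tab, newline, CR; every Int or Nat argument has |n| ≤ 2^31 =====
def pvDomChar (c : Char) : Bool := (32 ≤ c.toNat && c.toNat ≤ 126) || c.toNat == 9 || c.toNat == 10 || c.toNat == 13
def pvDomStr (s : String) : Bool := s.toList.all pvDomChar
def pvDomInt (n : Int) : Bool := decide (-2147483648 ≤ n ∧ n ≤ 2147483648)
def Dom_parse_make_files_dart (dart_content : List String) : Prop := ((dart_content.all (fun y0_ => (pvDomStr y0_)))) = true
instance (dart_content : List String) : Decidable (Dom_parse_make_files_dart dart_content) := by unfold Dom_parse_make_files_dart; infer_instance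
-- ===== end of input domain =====

-- B re-implements the parse in two phases (partition into blocks, then one dict per
-- non-empty block) instead of A's streaming generator; same cost, different decomposition.

-- ===== PORT A =====
-- A's loop body: flush the current dict at a '===' marker, otherwise split a non-empty
-- line on ': ' (maxsplit 1) and insert; the `| _ => st` arm is the ValueError case of
-- `key, value = line.split(': ', 1)`, excluded by Pre_.
def pvAStep (st : List (List (String × String)) × PySem.Dict String String) (line : String) :
    List (List (String × String)) × PySem.Dict String String :=
  if PySem.Str.startswith line "===" then
    if st.2.items ≠ [] then (st.1 ++ [st.2.items], PySem.Dict.mk []) else st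
  else if line ≠ "" then
    match PySem.Str.splitMax? line ": " 1 with
    | some [key, value] =>
        (st.1, st.2.insert (PySem.Str.strip key) (PySem.Str.strip value))
    | _ => st
  else st

def parse_make_files_dart (dart_content : List String) : List (List (String × String)) :=
  let st := dart_content.foldl pvAStep ([], PySem.Dict.mk [])
  if st.2.items ≠ [] then st.1 ++ [st.2.items] else st.1

-- ===== PORT B =====
-- Phase 1 loop body: start a new block at a '===' marker, keep non-empty lines.
def pvBStep (p : List (List String) × List String) (line : String) :
    List (List String) × List String :=
  if PySem.Str.startswith line "===" then (p.1 ++ [p.2], [])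
  else if line ≠ "" then (p.1, p.2 ++ [line])
  else p

-- Phase 2 inner loop: one block to one dict (the `| _ => entry` arm is the
-- ValueError case, excluded by Pre_).
def pvBlockDict (block : List String) : PySem.Dict String String :=
  block.foldl
    (fun entry line =>
      match PySem.Str.splitMax? line ": " 1 with
      | some [key, value] => entry.insert (PySem.Str.strip key) (PySem.Str.strip value)
      | _ => entry)
    (PySem.Dict.mk [])

def parse_make_files_dart_alt (dart_content : List String) : List (List (String × String)) :=
  let p := dart_content.foldl pvBStep ([], [])
  ((p.1 ++ [p.2]).filter (fun b => b ≠ [])).map (fun b => (pvBlockDict b).items)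

-- ===== PRECONDITION & SPEC =====
-- Pre_ excludes exactly the inputs on which A raises ValueError: a non-empty,
-- non-'===' line that does not contain ': ' (then split(': ', 1) yields one part,
-- not two, and the unpacking fails). B raises the same error there.
def Pre_parse_make_files_dart (dart_content : List String) : Prop :=
  ∀ l ∈ dart_content, PySem.Str.startswith l "===" = true ∨ l = "" ∨
    ((PySem.Str.splitMax? l ": " 1).getD []).length = 2
instance (dart_content : List String) : Decidable (Pre_parse_make_files_dart dart_content) := by
  unfold Pre_parse_make_files_dart; infer_instance

def pvWitness_parse_make_files_dart : List String :=
  ["NAME: first", "SIZE: 12", "", "=== end", "NAME: second"]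

def Spec_parse_make_files_dart (dart_content : List String) (out : List (List (String × String))) : Prop := out = parse_make_files_dart_alt dart_content
instance (dart_content : List String) (out : List (List (String × String))) : Decidable (Spec_parse_make_files_dart dart_content out) := by unfold Spec_parse_make_files_dart; infer_instance

-- ===== CLAIM (what is proved, stated in full; the proofs are below) =====
def Claim_equal_parse_make_files_dart : Prop := ∀ (dart_content : List String), Dom_parse_make_files_dart dart_content → Pre_parse_make_files_dart dart_content → Spec_parse_make_files_dart dart_content (parse_make_files_dart dart_content)

-- ===== LEMMAS AND PROOFS =====

-- a dict with any item inserted is non-empty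
lemma pv_insert_items_ne_nil (d : PySem.Dict String String) (k v : String) :
    (d.insert k v).items ≠ [] := by
  by_cases hc : d.contains k
  · have hk : k ∈ d.keys := (PySem.Dict.contains_iff_mem_keys d k).mp hc
    have hne : d.items ≠ [] := by
      intro h
      have : d.keys = [] := by
        cases d with
        | mk items => simpa [PySem.Dict.keys, h] using congrArg (List.map Prod.fst) h
      simp [this] at hk
    simp [PySem.Dict.items_insert, hc]
    intro h
    exact hne h
  · simp [PySem.Dict.items_insert, hc]

-- appending one line to a block performs one more insertion step
lemma pv_blockDict_append (cur : List String) (l : String) :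
    pvBlockDict (cur ++ [l]) =
      (match PySem.Str.splitMax? l ": " 1 with
       | some [key, value] =>
           (pvBlockDict cur).insert (PySem.Str.strip key) (PySem.Str.strip value)
       | _ => pvBlockDict cur) := by
  simp [pvBlockDict, List.foldl_append]

-- the loop invariant: A's (result, entry) state matches B's (blocks, current) state
lemma pv_loop (lines : List String)
    (hPre : ∀ l ∈ lines, PySem.Str.startswith l "===" = true ∨ l = "" ∨
      ((PySem.Str.splitMax? l ": " 1).getD []).length = 2) :
    ∀ (res : List (List (String × String))) (e : PySem.Dict String String)
      (bl : List (List String)) (cur : List String),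
      e = pvBlockDict cur →
      (e.items = [] ↔ cur = []) →
      res = (bl.filter (fun b => b ≠ [])).map (fun b => (pvBlockDict b).items) →
      (let st := lines.foldl pvAStep (res, e)
       if st.2.items ≠ [] then st.1 ++ [st.2.items] else st.1) =
      (let p := lines.foldl pvBStep (bl, cur)
       ((p.1 ++ [p.2]).filter (fun b => b ≠ [])).map (fun b => (pvBlockDict b).items)) := by
  induction lines with
  | nil =>
    intro res e bl cur he hiff hres
    subst he
    simp only [List.foldl_nil]
    by_cases hcur : cur = []
    · simp [hres, hcur, List.filter_append, pvBlockDict]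
    · have h0 : (pvBlockDict cur).items ≠ [] := fun h => hcur (hiff.mp h)
      simp [h0, hres, hcur, List.filter_append]
  | cons l rest ih =>
    intro res e bl cur he hiff hres
    subst he
    have hPreRest : ∀ x ∈ rest, PySem.Str.startswith x "===" = true ∨ x = "" ∨
        ((PySem.Str.splitMax? x ": " 1).getD []).length = 2 :=
      fun x hx => hPre x (List.mem_cons_of_mem _ hx)
    simp only [List.foldl_cons]
    by_cases hm : PySem.Str.startswith l "===" = true
    · have hms : PySem.Chars.startswith l.toList ['=', '=', '='] = true := by simpa using hm
      -- marker line: A flushes a non-empty entry, B always closes the block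
      by_cases hcur : cur = []
      · have hei : (pvBlockDict cur).items = [] := hiff.mpr hcur
        have hA : pvAStep (res, pvBlockDict cur) l = (res, pvBlockDict cur) := by simp [pvAStep, hms, hei]
        have hB : pvBStep (bl, cur) l = (bl ++ [cur], []) := by simp [pvBStep, hms]
        rw [hA, hB]
        refine ih hPreRest res (pvBlockDict cur) (bl ++ [cur]) [] ?_ ?_ ?_
        · simp [hcur]
        · simp [hei]
        · simp [hres, List.filter_append, hcur]
      · have hei : (pvBlockDict cur).items ≠ [] := fun h => hcur (hiff.mp h)
        have hA : pvAStep (res, pvBlockDict cur) l = (res ++ [(pvBlockDict cur).items], PySem.Dict.mk []) := by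
          simp [pvAStep, hms, hei]
        have hB : pvBStep (bl, cur) l = (bl ++ [cur], []) := by simp [pvBStep, hms]
        rw [hA, hB]
        refine ih hPreRest (res ++ [(pvBlockDict cur).items]) (PySem.Dict.mk []) (bl ++ [cur]) [] rfl (by simp) ?_
        simp [hres, List.filter_append, hcur]
    · have hms : PySem.Chars.startswith l.toList ['=', '=', '='] = false := by
        simpa using hm
      by_cases hl : l = ""
      · -- empty line: both states unchanged
        have hnil : PySem.Chars.startswith ([] : List Char) ['=', '=', '='] = false := by decide
        have hA : pvAStep (res, pvBlockDict cur) l = (res, pvBlockDict cur) := by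
          subst hl; simp [pvAStep, hnil]
        have hB : pvBStep (bl, cur) l = (bl, cur) := by subst hl; simp [pvBStep, hnil]
        rw [hA, hB]
        exact ih hPreRest res (pvBlockDict cur) bl cur rfl hiff hres
      · -- data line: Pre_ guarantees the split has exactly two parts
        have hlen : ((PySem.Str.splitMax? l ": " 1).getD []).length = 2 := by
          rcases hPre l (List.mem_cons_self) with h | h | h
          · exact absurd h hm
          · exact absurd h hl
          · exact h
        obtain ⟨key, value, hsplit⟩ :
            ∃ key value, PySem.Str.splitMax? l ": " 1 = some [key, value] := by
          cases hs : PySem.Str.splitMax? l ": " 1 with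
          | none => simp [hs] at hlen
          | some xs =>
            rw [hs] at hlen
            simp only [Option.getD_some] at hlen
            match xs, hlen with
            | [a, b], _ => exact ⟨a, b, rfl⟩
        have hA : pvAStep (res, pvBlockDict cur) l =
            (res, (pvBlockDict cur).insert (PySem.Str.strip key) (PySem.Str.strip value)) := by
          simp [pvAStep, hms, hl, hsplit]
        have hB : pvBStep (bl, cur) l = (bl, cur ++ [l]) := by simp [pvBStep, hms, hl]
        rw [hA, hB]
        refine ih hPreRest res _ bl (cur ++ [l]) ?_ ?_ hres
        · rw [pv_blockDict_append, hsplit]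
        · constructor
          · intro h; exact absurd h (pv_insert_items_ne_nil _ _ _)
          · intro h; simp at h

-- ===== VERDICT (by name: the statement is the Claim_ definition above) =====
theorem parse_make_files_dart_spec : Claim_equal_parse_make_files_dart := by
  intro dart_content _ hPre
  show parse_make_files_dart dart_content = parse_make_files_dart_alt dart_content
  unfold parse_make_files_dart parse_make_files_dart_alt
  exact pv_loop dart_content hPre [] (PySem.Dict.mk []) [] [] rfl (by simp) rfl
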